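-- pv_equiv track=rewrite | github.com/definitelyNotTheCluelessBoy/python_starters | steganografia.py | zmen
-- ===== SOURCE A (Python) =====
-- def zmen(sprava):
--     temp = []
--     for i in sprava:
--         bn = bin(ord(i))[2::]
--         if len(bn) == 6:
--             temp.append(int(0))
--             temp.append(int(0))
--         else:
--             temp.append(int(0))
--         for j in bn:
--             temp.append(int(j))
--     return temp
-- ===== SOURCE B (Python) =====
-- def zmen(sprava):
--     out = []
--     for c in sprava:
--         n = ord(c)
--         bits = []          # bits of n, least significant first
--         while n:
--             bits.append(n & 1)
--             n >>= 1
--         if not bits: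
--             bits = [0]
--         out.extend([0, 0] if len(bits) == 6 else [0])
--         out.extend(reversed(bits))
--     return out
-- ===== Notes on version B (the rewrite author's own statement) =====
-- stated objective: alternative
-- what changed: B extracts bits arithmetically (n&1 / n>>=1 into a reversed list) instead of formatting with bin() and parsing the characters of the resulting string back with int().
import Mathlib
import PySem

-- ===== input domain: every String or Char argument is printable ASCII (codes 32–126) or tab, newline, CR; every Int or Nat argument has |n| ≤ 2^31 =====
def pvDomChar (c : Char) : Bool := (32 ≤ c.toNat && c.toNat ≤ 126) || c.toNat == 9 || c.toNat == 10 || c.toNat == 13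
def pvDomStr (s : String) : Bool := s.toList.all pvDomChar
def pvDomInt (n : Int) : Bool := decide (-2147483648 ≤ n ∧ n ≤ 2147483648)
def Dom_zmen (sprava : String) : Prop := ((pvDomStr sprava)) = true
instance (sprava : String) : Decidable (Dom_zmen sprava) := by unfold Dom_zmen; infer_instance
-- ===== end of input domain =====

-- B extracts each character's bits arithmetically (shift/mask into a reversed list) instead of
-- formatting with bin() and parsing the resulting string's characters back with int().


-- ===== PORT A =====
-- bin(n)[2:] for n ≥ 1: binary digit characters, most significant first
def binDigits : Nat → List Char
  | 0 => []
  | n+1 => binDigits ((n+1) / 2) ++ [if (n+1) % 2 = 1 then '1' else '0']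
-- bin(n)[2:] for n ≥ 0 (bin(0) = '0b0', so '0')
def pyBin (n : Nat) : List Char := if n = 0 then ['0'] else binDigits n

def zmen (sprava : String) : List Int :=
  sprava.toList.foldl (fun temp i =>
    let bn := pyBin i.toNat
    let temp := if bn.length = 6 then temp ++ [(0:Int), 0] else temp ++ [(0:Int)]
    -- int(j): exact, since bn contains only '0'/'1'
    temp ++ bn.map (fun j => if j = '1' then (1:Int) else 0)) []

-- ===== PORT B =====
-- the while loop: bits of n, least significant first
def bitsRev : Nat → List Int
  | 0 => []
  | n+1 => ((n+1) % 2 : Nat) :: bitsRev ((n+1) / 2)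

def zmen_alt (sprava : String) : List Int :=
  sprava.toList.foldl (fun out c =>
    let bits := if bitsRev c.toNat = [] then [(0:Int)] else bitsRev c.toNat
    out ++ (if bits.length = 6 then [(0:Int), 0] else [(0:Int)]) ++ bits.reverse) []

-- ===== PRECONDITION & SPEC =====
def Spec_zmen (sprava : String) (out : List Int) : Prop := out = zmen_alt sprava
instance (sprava : String) (out : List Int) : Decidable (Spec_zmen sprava out) := by unfold Spec_zmen; infer_instance

-- ===== CLAIM (what is proved, stated in full; the proofs are below) =====
def Claim_equal_zmen : Prop := ∀ (sprava : String), Dom_zmen sprava → Spec_zmen sprava (zmen sprava)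

-- ===== LEMMAS AND PROOFS =====
-- per-character contribution of each port
def stepA (i : Char) : List Int :=
  (if (pyBin i.toNat).length = 6 then [(0:Int), 0] else [(0:Int)]) ++
    (pyBin i.toNat).map (fun j => if j = '1' then (1:Int) else 0)

def stepB (c : Char) : List Int :=
  (if (if bitsRev c.toNat = [] then [(0:Int)] else bitsRev c.toNat).length = 6
    then [(0:Int), 0] else [(0:Int)]) ++
    (if bitsRev c.toNat = [] then [(0:Int)] else bitsRev c.toNat).reverse

theorem binDigits_map (n : Nat) :
    (binDigits n).map (fun j => if j = '1' then (1:Int) else 0) = (bitsRev n).reverse := by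
  induction n using Nat.strong_induction_on with
  | _ n ih =>
    match n with
    | 0 => simp [binDigits, bitsRev]
    | m+1 =>
      rw [binDigits, bitsRev]
      simp only [List.map_append, List.map, List.reverse_cons]
      rw [ih ((m+1)/2) (by omega)]
      congr 1
      rcases Nat.mod_two_eq_zero_or_one (m+1) with h | h <;> simp [h]

theorem step_eq (c : Char) : stepA c = stepB c := by
  unfold stepA stepB
  rcases Nat.eq_zero_or_pos c.toNat with h | h
  · rw [h]; simp [pyBin, bitsRev]
  · obtain ⟨m, hm⟩ : ∃ m, c.toNat = m + 1 := ⟨c.toNat - 1, by omega⟩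
    rw [hm]
    have hne : bitsRev (m+1) ≠ [] := by rw [bitsRev]; simp
    have hpy : pyBin (m+1) = binDigits (m+1) := by simp [pyBin]
    have hmap := binDigits_map (m+1)
    have hlen : (binDigits (m+1)).length = (bitsRev (m+1)).length := by
      have := congrArg List.length hmap
      simpa using this
    simp only [if_neg hne, hpy, hlen, hmap]

theorem foldl_eq (l : List Char) (acc : List Int) (h : l.all pvDomChar = true) :
    l.foldl (fun temp i =>
      let bn := pyBin i.toNat
      let temp := if bn.length = 6 then temp ++ [(0:Int), 0] else temp ++ [(0:Int)]
      temp ++ bn.map (fun j => if j = '1' then (1:Int) else 0)) acc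
  = l.foldl (fun out c =>
      let bits := if bitsRev c.toNat = [] then [(0:Int)] else bitsRev c.toNat
      out ++ (if bits.length = 6 then [(0:Int), 0] else [(0:Int)]) ++ bits.reverse) acc := by
  induction l generalizing acc with
  | nil => rfl
  | cons c t ih =>
    simp only [List.all_cons, Bool.and_eq_true] at h
    simp only [List.foldl_cons]
    have hs := step_eq c
    simp only [stepA, stepB] at hs
    have harr : (if (pyBin c.toNat).length = 6 then acc ++ [(0:Int), 0] else acc ++ [(0:Int)]) ++
        (pyBin c.toNat).map (fun j => if j = '1' then (1:Int) else 0)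
      = acc ++ ((if (if bitsRev c.toNat = [] then [(0:Int)] else bitsRev c.toNat).length = 6
          then [(0:Int), 0] else [(0:Int)]) ++
          (if bitsRev c.toNat = [] then [(0:Int)] else bitsRev c.toNat).reverse) := by
      rw [← hs]
      split <;> simp
    simp only [harr, ← List.append_assoc]
    exact ih _ h.2

-- ===== VERDICT (by name: the statement is the Claim_ definition above) =====
theorem zmen_spec : Claim_equal_zmen := by
  intro s hd
  unfold Spec_zmen zmen zmen_alt
  exact foldl_eq s.toList [] hd
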